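-- pv_equiv track=rewrite | github.com/lehoa1806/quotio-python | quotio/services/quota_fetchers/antigravity.py | _normalize_email_from_filename
-- ===== SOURCE A (Python) =====
-- def _normalize_email_from_filename(email: str) -> str:
--     """Normalize email extracted from filename to proper @ format.
--
--     Converts patterns like 'user.domain.com' to 'user@domain.com'.
--     Handles filenames like 'antigravity-user_domain_com.json' -> 'user@domain.com'.
--     """
--     if "@" in email:
--         return email
--
--     # Try common email domain patterns
--     common_domains = [
--         "gmail.com", "googlemail.com", "outlook.com", "hotmail.com",
--         "yahoo.com", "icloud.com", "protonmail.com", "proton.me",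
--         "opensend.com"  # Add custom domain
--     ]
--     for domain in common_domains:
--         domain_with_dot = f".{domain}"
--         if email.endswith(domain_with_dot):
--             return email[:-len(domain_with_dot)] + f"@{domain}"
--
--     # Fallback: assume last two dot-separated parts are domain
--     # e.g., user.opensend.com -> user@opensend.com
--     parts = email.split(".")
--     if len(parts) >= 3:
--         user = ".".join(parts[:-2])
--         domain = ".".join(parts[-2:])
--         return f"{user}@{domain}"
--
--     return email
-- ===== SOURCE B (Python) =====
-- def _normalize_email_from_filename(email: str) -> str:
--     """Normalize email extracted from filename to proper @ format."""
--     if "@" in email: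
--         return email
--     parts = email.split(".")
--     if len(parts) >= 3:
--         return ".".join(parts[:-2]) + "@" + ".".join(parts[-2:])
--     return email
-- ===== Notes on version B (the rewrite author's own statement) =====
-- stated objective: simpler
-- what changed: B drops A's whole hardcoded common_domains scanning loop and keeps only the at-sign guard plus the generic split-on-dots fallback; since every hardcoded domain has exactly two dot-parts, the fallback yields the identical string on every input the loop would have caught.
import Mathlib
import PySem

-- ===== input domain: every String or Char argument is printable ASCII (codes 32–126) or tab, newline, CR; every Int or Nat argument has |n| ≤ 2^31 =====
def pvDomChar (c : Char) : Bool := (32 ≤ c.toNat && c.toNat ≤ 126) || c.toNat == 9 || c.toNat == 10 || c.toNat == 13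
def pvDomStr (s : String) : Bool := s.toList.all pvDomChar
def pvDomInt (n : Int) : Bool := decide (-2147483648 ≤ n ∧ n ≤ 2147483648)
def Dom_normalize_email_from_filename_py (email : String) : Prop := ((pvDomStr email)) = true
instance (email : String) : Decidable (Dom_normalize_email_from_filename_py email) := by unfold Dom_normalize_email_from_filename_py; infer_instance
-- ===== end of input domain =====

-- B drops A's hardcoded common_domains scanning loop (every listed domain is two dot-parts,
-- so the generic last-two-parts fallback returns the identical string): objective 'simpler'.

-- ===== PORT A =====
def pvCommonDomains : List String :=
  ["gmail.com", "googlemail.com", "outlook.com", "hotmail.com",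
   "yahoo.com", "icloud.com", "protonmail.com", "proton.me",
   "opensend.com"]

-- the 'for domain in common_domains' loop with its early return
def pvTryDomains (email : String) : List String → Option String
  | [] => none
  | domain :: rest =>
    let domain_with_dot := "." ++ domain
    if PySem.Str.endswith email domain_with_dot then
      some (PySem.Str.slice email none (some (-(PySem.Str.len domain_with_dot))) ++ "@" ++ domain)
    else pvTryDomains email rest

def normalize_email_from_filename_py (email : String) : String :=
  if PySem.Str.isIn "@" email then email
  else
    match pvTryDomains email pvCommonDomains with
    | some r => r
    | none =>
      -- email.split(".") with nonempty separator: PySem.Chars.splitOn is exact here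
      let parts := (PySem.Chars.splitOn email.toList ['.']).map String.ofList
      if 3 ≤ parts.length then
        PySem.Str.join "." (PySem.List.slice parts none (some (-2))) ++ "@" ++
          PySem.Str.join "." (PySem.List.slice parts (some (-2)) none)
      else email

-- ===== PORT B =====
def normalize_email_from_filename_py_alt (email : String) : String :=
  if PySem.Str.isIn "@" email then email
  else
    -- email.split(".") with nonempty separator: PySem.Chars.splitOn is exact here
    let parts := (PySem.Chars.splitOn email.toList ['.']).map String.ofList
    if 3 ≤ parts.length then
      PySem.Str.join "." (PySem.List.slice parts none (some (-2))) ++ "@" ++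
        PySem.Str.join "." (PySem.List.slice parts (some (-2)) none)
    else email

-- ===== PRECONDITION & SPEC =====
def Spec_normalize_email_from_filename_py (email : String) (out : String) : Prop := out = normalize_email_from_filename_py_alt email
instance (email : String) (out : String) : Decidable (Spec_normalize_email_from_filename_py email out) := by unfold Spec_normalize_email_from_filename_py; infer_instance

-- ===== CLAIM (what is proved, stated in full; the proofs are below) =====
def Claim_equal_normalize_email_from_filename_py : Prop := ∀ (email : String), Dom_normalize_email_from_filename_py email → Spec_normalize_email_from_filename_py email (normalize_email_from_filename_py email)

-- ===== LEMMAS AND PROOFS =====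

-- a functional restatement of PySem.Chars.splitOn with sep = ['.']
def pvConsHead (x : List Char) : List (List Char) → List (List Char)
  | [] => [x]
  | y :: ys => (x ++ y) :: ys

def pvSplit : List Char → List (List Char)
  | [] => [[]]
  | c :: rest => if c = '.' then [] :: pvSplit rest else pvConsHead [c] (pvSplit rest)

lemma pvConsHead_ne_nil (x : List Char) (m : List (List Char)) : pvConsHead x m ≠ [] := by
  cases m <;> simp [pvConsHead]

lemma pvSplit_ne_nil (l : List Char) : pvSplit l ≠ [] := by
  cases l with
  | nil => simp [pvSplit]
  | cons c rest =>
    simp only [pvSplit]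
    split_ifs
    · simp
    · exact pvConsHead_ne_nil _ _

lemma pvConsHead_nil (m : List (List Char)) (hm : m ≠ []) : pvConsHead [] m = m := by
  cases m with
  | nil => exact absurd rfl hm
  | cons y ys => simp [pvConsHead]

lemma pvConsHead_consHead (a b : List Char) (m : List (List Char)) :
    pvConsHead a (pvConsHead b m) = pvConsHead (a ++ b) m := by
  cases m <;> simp [pvConsHead]

lemma pv_go_eq : ∀ (fuel : Nat) (l : List Char) (cur : List Char) (acc : List (List Char)),
    l.length ≤ fuel →
    PySem.Chars.splitOn.go ['.'] fuel l cur acc = acc.reverse ++ pvConsHead cur.reverse (pvSplit l) := by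
  intro fuel
  induction fuel with
  | zero =>
    intro l cur acc h
    have : l = [] := by cases l <;> simp_all
    subst this
    simp [PySem.Chars.splitOn.go, pvSplit, pvConsHead]
  | succ f ih =>
    intro l cur acc h
    cases l with
    | nil => simp [PySem.Chars.splitOn.go, pvSplit, pvConsHead]
    | cons c rest =>
      have hlen : rest.length ≤ f := by simpa using h
      by_cases hc : c = '.'
      · subst hc
        rw [PySem.Chars.splitOn.go]
        have hpre : List.isPrefixOf ['.'] ('.' :: rest) = true := by
          simp [List.isPrefixOf]
        simp only [hpre, if_true, List.length_singleton, List.drop_succ_cons, List.drop_zero]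
        rw [ih rest [] _ hlen]
        simp only [pvSplit, List.reverse_nil]
        rw [pvConsHead_nil _ (pvSplit_ne_nil rest)]
        obtain ⟨y, ys, hy⟩ := List.exists_cons_of_ne_nil (pvSplit_ne_nil rest)
        rw [hy]
        simp [pvConsHead]
      · rw [PySem.Chars.splitOn.go]
        have hpre : List.isPrefixOf ['.'] (c :: rest) = false := by
          simp [List.isPrefixOf]
          exact fun h' => hc h'.symm
        simp only [hpre, Bool.false_eq_true, if_false]
        rw [ih rest (c :: cur) acc hlen]
        simp only [pvSplit, if_neg hc, List.reverse_cons]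
        rw [pvConsHead_consHead]

lemma pv_splitOn_eq (l : List Char) : PySem.Chars.splitOn l ['.'] = pvSplit l := by
  unfold PySem.Chars.splitOn
  rw [pv_go_eq (l.length + 1) l [] [] (by omega)]
  simp [pvConsHead_nil _ (pvSplit_ne_nil l)]

lemma pvSplit_append (xs ys : List Char) :
    pvSplit (xs ++ '.' :: ys) = pvSplit xs ++ pvSplit ys := by
  induction xs with
  | nil => simp [pvSplit]
  | cons c rest ih =>
    simp only [List.cons_append, pvSplit, ih]
    split_ifs
    · rfl
    · obtain ⟨y, ys, hy⟩ := List.exists_cons_of_ne_nil (pvSplit_ne_nil rest)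
      simp [hy, pvConsHead]

lemma pvIntercalate_consHead (sep a : List Char) (m : List (List Char)) (hm : m ≠ []) :
    List.intercalate sep (pvConsHead a m) = a ++ List.intercalate sep m := by
  obtain ⟨y, ys, hy⟩ := List.exists_cons_of_ne_nil hm
  subst hy
  cases ys with
  | nil => simp [pvConsHead, List.intercalate]
  | cons z zs => simp [pvConsHead, List.intercalate]

lemma pv_join_pvSplit (l : List Char) : PySem.Chars.join ['.'] (pvSplit l) = l := by
  induction l with
  | nil => simp [pvSplit, PySem.Chars.join, List.intercalate]
  | cons c rest ih =>
    simp only [pvSplit]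
    split_ifs with hc
    · subst hc
      obtain ⟨y, ys, hy⟩ := List.exists_cons_of_ne_nil (pvSplit_ne_nil rest)
      simp only [PySem.Chars.join] at ih ⊢
      rw [hy] at ih ⊢
      simp [List.intercalate] at ih ⊢
      exact ih
    · simp only [PySem.Chars.join] at ih ⊢
      rw [pvIntercalate_consHead _ _ _ (pvSplit_ne_nil rest), ih]
      rfl

lemma pv_slice_neg (l : List Char) (k : Nat) (hk : k ≤ l.length) (hk0 : 0 < k) :
    PySem.List.slice l none (some (-(k : Int))) = l.take (l.length - k) := by
  simp only [PySem.List.slice, PySem.List.clampIdx]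
  have h1 : ¬ ((l.length : Int) + -(k : Int) < 0) := by omega
  have h2 : (-(k:Int) < 0) := by omega
  simp only [h2, if_true, h1, if_false, List.drop_zero]
  congr 1
  omega

lemma pv_slice_drop2_front {α : Type} (P t : List α) (ht : t.length = 2) :
    PySem.List.slice (P ++ t) none (some (-2)) = P := by
  simp only [PySem.List.slice, PySem.List.clampIdx, List.length_append, ht]
  have h1 : ¬ ((↑(P.length + 2) : Int) + -2 < 0) := by omega
  have h2 : (-2 : Int) < 0 := by decide
  simp only [h2, if_true, h1, if_false, List.drop_zero]
  have : ((↑(P.length + 2) : Int) + -2).toNat - 0 = P.length := by omega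
  rw [this, List.take_append_of_le_length (le_refl _), List.take_length]

lemma pv_slice_drop2_back {α : Type} (P t : List α) (ht : t.length = 2) :
    PySem.List.slice (P ++ t) (some (-2)) none = t := by
  simp only [PySem.List.slice, PySem.List.clampIdx, List.length_append, ht]
  have h1 : ¬ ((↑(P.length + 2) : Int) + -2 < 0) := by omega
  have h2 : (-2 : Int) < 0 := by decide
  simp only [h2, if_true, h1, if_false]
  have ha : ((↑(P.length + 2) : Int) + -2).toNat = P.length := by omega
  rw [ha, List.drop_append_of_le_length (le_refl _), List.drop_length, List.nil_append]
  have : P.length + 2 - P.length = 2 := by omega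
  rw [this, ← ht, List.take_length]

-- the matched-domain branch of A equals B's generic fallback
lemma pv_domain_key (email d : String) (d1 d2 : List Char)
    (hd : pvSplit d.toList = [d1, d2])
    (h : PySem.Str.endswith email ("." ++ d) = true) :
    PySem.Str.slice email none (some (-(PySem.Str.len ("." ++ d)))) ++ "@" ++ d
      = (let parts := (PySem.Chars.splitOn email.toList ['.']).map String.ofList
         if 3 ≤ parts.length then
           PySem.Str.join "." (PySem.List.slice parts none (some (-2))) ++ "@" ++
             PySem.Str.join "." (PySem.List.slice parts (some (-2)) none)
         else email) := by
  have hsuf : ('.' :: d.toList) <:+ email.toList := by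
    have := (PySem.Str.endswith_eq email ("." ++ d))
    rw [h] at this
    have h2 := (PySem.Chars.endswith_iff email.toList (("." ++ d).toList)).mp this.symm
    simpa using h2
  obtain ⟨p, hp⟩ := hsuf
  have hparts : PySem.Chars.splitOn email.toList ['.'] = pvSplit p ++ [d1, d2] := by
    rw [pv_splitOn_eq, ← hp, pvSplit_append, hd]
  obtain ⟨y, ys, hy⟩ := List.exists_cons_of_ne_nil (pvSplit_ne_nil p)
  have hlen3 : 3 ≤ ((PySem.Chars.splitOn email.toList ['.']).map String.ofList).length := by
    rw [hparts, hy]; simp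
  simp only [hlen3, if_true]
  apply String.toList_inj.mp
  rw [hparts]
  simp only [List.map_append, String.toList_append]
  rw [pv_slice_drop2_front _ _ (by simp), pv_slice_drop2_back _ _ (by simp)]
  have hjoin1 : (PySem.Str.join "." ((pvSplit p).map String.ofList)).toList = p := by
    rw [PySem.Str.toList_join]
    have : (List.map String.toList ((pvSplit p).map String.ofList)) = pvSplit p := by
      simp [List.map_map, Function.comp_def]
    rw [this]
    have hsep : ("." : String).toList = ['.'] := by decide
    rw [hsep, pv_join_pvSplit]
  have hjoin2 : (PySem.Str.join "." (([d1, d2]).map String.ofList)).toList = d.toList := by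
    rw [PySem.Str.toList_join]
    have : (List.map String.toList (([d1,d2]).map String.ofList)) = [d1, d2] := by
      simp
    rw [this]
    have hsep : ("." : String).toList = ['.'] := by decide
    rw [hsep, ← hd, pv_join_pvSplit]
  rw [hjoin1, hjoin2]
  have hlenA : PySem.Str.len ("." ++ d) = ((1 + d.toList.length : Nat) : Int) := by
    rw [PySem.Str.len_eq]; simp; omega
  rw [hlenA, PySem.Str.toList_slice, PySem.Chars.slice_eq_listSlice,
    pv_slice_neg _ _ (by rw [← hp]; simp; omega) (by omega)]
  rw [← hp]
  have hl : (p ++ '.' :: d.toList).length - (1 + d.toList.length) = p.length := by simp; omega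
  rw [hl, List.take_append_of_le_length (le_refl _), List.take_length]

lemma pv_try_eq (email : String) (ds : List String)
    (hds : ∀ d ∈ ds, (pvSplit d.toList).length = 2) (r : String)
    (hr : pvTryDomains email ds = some r) :
    r = (let parts := (PySem.Chars.splitOn email.toList ['.']).map String.ofList
         if 3 ≤ parts.length then
           PySem.Str.join "." (PySem.List.slice parts none (some (-2))) ++ "@" ++
             PySem.Str.join "." (PySem.List.slice parts (some (-2)) none)
         else email) := by
  induction ds with
  | nil => simp [pvTryDomains] at hr
  | cons d rest ih =>
    simp only [pvTryDomains] at hr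
    split_ifs at hr with hmatch
    · have h2 := hds d (by simp)
      have : ∃ d1 d2, pvSplit d.toList = [d1, d2] := by
        match hm : pvSplit d.toList with
        | [d1, d2] => exact ⟨d1, d2, rfl⟩
        | [] | [_] | _ :: _ :: _ :: _ => rw [hm] at h2; simp at h2
      obtain ⟨d1, d2, hsplit⟩ := this
      have := pv_domain_key email d d1 d2 hsplit hmatch
      rw [← this, ← Option.some_inj, ← hr]
    · exact ih (fun x hx => hds x (by simp [hx])) hr

theorem pv_main (email : String) :
    normalize_email_from_filename_py email = normalize_email_from_filename_py_alt email := by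
  unfold normalize_email_from_filename_py normalize_email_from_filename_py_alt
  by_cases hat : PySem.Str.isIn "@" email = true
  · simp only [hat, if_true]
  · simp only [Bool.not_eq_true] at hat
    simp only [hat, Bool.false_eq_true, if_false]
    cases htry : pvTryDomains email pvCommonDomains with
    | none => rfl
    | some r =>
      exact pv_try_eq email pvCommonDomains (by decide) r htry

-- ===== VERDICT (by name: the statement is the Claim_ definition above) =====
theorem normalize_email_from_filename_py_spec : Claim_equal_normalize_email_from_filename_py := by
  intro email _
  unfold Spec_normalize_email_from_filename_py
  exact pv_main email
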